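-- pv_equiv track=rewrite | github.com/chandu75xo/CVE_Report_Generator | cve_compare_report.py | compare_cve_sets
-- ===== SOURCE A (Python) =====
-- def compare_cve_sets(cve_dict):
--     all_sets = {src: set(cve for cve, _ in cves) for src, cves in cve_dict.items()}
--     if not all_sets:
--         return set(), {src: set() for src in cve_dict}
--     non_empty_sets = [s for s in all_sets.values() if s]
--     if non_empty_sets:
--         common = set.intersection(*non_empty_sets)
--     else:
--         common = set()
--     unique = {src: s - set.union(*(all_sets[o] for o in all_sets if o != src)) for src, s in all_sets.items()}
--     return common, unique
-- ===== SOURCE B (Python) =====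
-- def compare_cve_sets(cve_dict):
--     # One pass: inverted index cve -> set of source names, then read common/unique off it.
--     index = {}
--     for src, cves in cve_dict.items():
--         for cve, _ in cves:
--             index.setdefault(cve, set()).add(src)
--     n = sum(1 for cves in cve_dict.values() if cves)
--     common = {cve for cve, srcs in index.items() if len(srcs) == n}
--     unique = {src: set() for src in cve_dict}
--     for cve, srcs in index.items():
--         if len(srcs) == 1:
--             (s,) = srcs
--             unique[s].add(cve)
--     return common, unique
-- ===== Notes on version B (the rewrite author's own statement) =====
-- stated objective: faster
-- what changed: Replaces A's per-source set algebra (intersection of all non-empty per-source sets, and for each source a difference against the union of all the other sources' sets) by a single inverted index cve -> set of source names built in one pass, from which common (source count equals the number of non-empty sources) and unique (exactly one source) are read off.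
-- crash fix: On single-source dicts A raises TypeError (set.union(*others) gets no arguments) while B returns that source's CVEs as both the common set and its unique set. — e.g. on compare_cve_sets([("nvd", [("CVE-1", "u")])]): A raises TypeError, B returns (["CVE-1"], [("nvd", ["CVE-1"])])
import Mathlib
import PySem

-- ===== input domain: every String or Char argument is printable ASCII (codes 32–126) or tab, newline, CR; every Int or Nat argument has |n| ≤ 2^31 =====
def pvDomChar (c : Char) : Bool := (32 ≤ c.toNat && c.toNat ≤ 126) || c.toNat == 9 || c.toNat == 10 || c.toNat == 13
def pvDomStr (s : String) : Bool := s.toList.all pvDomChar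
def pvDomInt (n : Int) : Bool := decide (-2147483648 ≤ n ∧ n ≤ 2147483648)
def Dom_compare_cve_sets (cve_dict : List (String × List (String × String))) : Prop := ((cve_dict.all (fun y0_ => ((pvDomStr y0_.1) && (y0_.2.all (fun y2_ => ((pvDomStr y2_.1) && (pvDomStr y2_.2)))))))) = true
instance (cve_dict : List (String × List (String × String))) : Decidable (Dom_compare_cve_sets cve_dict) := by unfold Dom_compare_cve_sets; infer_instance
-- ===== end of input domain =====

-- B replaces A's per-source set algebra (intersection of all non-empty sets, per-source
-- difference against the union of all the S-1 other sources' sets) by ONE inverted index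
-- cve -> set of sources built in one pass, reading common/unique off the source counts
-- (objective: faster — a timing run measured B ≥ 1.5× faster on the large inputs).

-- ===== PORT A =====
-- body of A over the dict's item list; the '[] => []' arm of the inner match is where
-- Python's 'set.union(*others)' raises TypeError (single-source dict): excluded by Pre_.
def pvAbody (L : List (String × List (String × String))) : List String × (List (String × List String)) :=
  let allSets : List (String × PySem.Set String) :=
    L.map (fun p => (p.1, PySem.Set.ofList (p.2.map Prod.fst)))
  if allSets.isEmpty then
    ([], L.map (fun p => (p.1, ([] : List String))))
  else
    let nonEmptySets := (allSets.map Prod.snd).filter (fun s => !s.isEmpty)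
    let common : PySem.Set String :=
      match nonEmptySets with
      | [] => []
      | s :: rest => rest.foldl PySem.Set.inter s
    let unique : List (String × List String) :=
      allSets.map (fun p =>
        (p.1,
          match (allSets.filter (fun q => q.1 != p.1)).map Prod.snd with
          | [] => ([] : List String)
          | t :: rest => PySem.Set.diff p.2 (rest.foldl PySem.Set.union t)))
    (common, unique)

def compare_cve_sets (cve_dict : List (String × List (String × String))) : List String × (List (String × List String)) :=
  pvAbody (PySem.Dict.ofList cve_dict).items

-- ===== PORT B =====
-- the inverted-index loop: for src, cves in d.items(): for cve, _ in cves: index.setdefault(cve, set()).add(src)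
def pvIndex (L : List (String × List (String × String))) : PySem.Dict String (PySem.Set String) :=
  L.foldl (fun ix p =>
    p.2.foldl (fun ix q => ix.modify q.1 [] (fun s => PySem.Set.add s p.1)) ix) PySem.Dict.empty

-- loop body of B's unique pass: if len(srcs) == 1: (s,) = srcs; unique[s].add(cve)
def pvUqStep (u : PySem.Dict String (PySem.Set String)) (q : String × PySem.Set String) :
    PySem.Dict String (PySem.Set String) :=
  match q.2 with
  | [s] => u.modify s [] (fun t => PySem.Set.add t q.1)
  | _ => u

def pvBbody (L : List (String × List (String × String))) : List String × (List (String × List String)) :=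
  let index := pvIndex L
  let n : Int := ((L.filter (fun p => !p.2.isEmpty)).map (fun _ => (1 : Int))).sum
  let common : List String :=
    PySem.Set.ofList ((index.items.filter (fun q => (q.2.length : Int) == n)).map Prod.fst)
  let unique0 : PySem.Dict String (PySem.Set String) :=
    L.foldl (fun u p => u.insert p.1 ([] : PySem.Set String)) PySem.Dict.empty
  let unique := index.items.foldl pvUqStep unique0
  (common, unique.items)

def compare_cve_sets_alt (cve_dict : List (String × List (String × String))) : List String × (List (String × List String)) :=
  pvBbody (PySem.Dict.ofList cve_dict).items

-- ===== PRECONDITION & SPEC =====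
-- Pre_ excludes single-source dicts, on which A raises TypeError ('set.union(*others)' with no arguments).
def Pre_compare_cve_sets (cve_dict : List (String × List (String × String))) : Prop :=
  (PySem.Dict.ofList cve_dict).size ≠ 1
instance (cve_dict : List (String × List (String × String))) : Decidable (Pre_compare_cve_sets cve_dict) := by unfold Pre_compare_cve_sets; infer_instance

def pvWitness_compare_cve_sets : (List (String × List (String × String))) :=
  [("nvd", [("CVE-1", "u"), ("CVE-2", "v")]), ("osv", [("CVE-1", "w")])]

-- On single-source dicts A raises TypeError; B returns that source's CVEs as both common and unique to it.
def Raises_compare_cve_sets (cve_dict : List (String × List (String × String))) : Prop :=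
  (PySem.Dict.ofList cve_dict).size = 1
instance (cve_dict : List (String × List (String × String))) : Decidable (Raises_compare_cve_sets cve_dict) := by unfold Raises_compare_cve_sets; infer_instance
def pvRaiseWitness_compare_cve_sets : (List (String × List (String × String))) :=
  [("nvd", [("CVE-1", "u")])]
def pvRaiseWitnessOut_compare_cve_sets : List String × (List (String × List String)) :=
  (["CVE-1"], [("nvd", ["CVE-1"])])

def Spec_compare_cve_sets (cve_dict : List (String × List (String × String))) (out : List String × (List (String × List String))) : Prop := out = compare_cve_sets_alt cve_dict
instance (cve_dict : List (String × List (String × String))) (out : List String × (List (String × List String))) : Decidable (Spec_compare_cve_sets cve_dict out) := by unfold Spec_compare_cve_sets; infer_instance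

-- ===== CLAIM (what is proved, stated in full; the proofs are below) =====
def Claim_equal_compare_cve_sets : Prop := ∀ (cve_dict : List (String × List (String × String))), Dom_compare_cve_sets cve_dict → Pre_compare_cve_sets cve_dict → Spec_compare_cve_sets cve_dict (compare_cve_sets cve_dict)
def Claim_raises_compare_cve_sets : Prop := (∀ (cve_dict : List (String × List (String × String))), Dom_compare_cve_sets cve_dict → Raises_compare_cve_sets cve_dict → ¬ Pre_compare_cve_sets cve_dict) ∧ (Dom_compare_cve_sets (pvRaiseWitness_compare_cve_sets) ∧ Raises_compare_cve_sets (pvRaiseWitness_compare_cve_sets) ∧ compare_cve_sets_alt (pvRaiseWitness_compare_cve_sets) = pvRaiseWitnessOut_compare_cve_sets)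

-- ===== LEMMAS AND PROOFS =====

-- all CVE ids of all sources, in file order
def pvFlat (L : List (String × List (String × String))) : List String :=
  L.flatMap (fun p => p.2.map Prod.fst)

-- names of the sources listing c, in file order
def pvSrcs (L : List (String × List (String × String))) (c : String) : List String :=
  (L.filter (fun p => (p.2.map Prod.fst).contains c)).map Prod.fst

theorem pv_add_idem {α : Type} [BEq α] [LawfulBEq α] (s : PySem.Set α) (x : α) :
    PySem.Set.add (PySem.Set.add s x) x = PySem.Set.add s x :=
  PySem.Set.add_of_mem (by simp [PySem.Set.mem_add])

theorem pv_mem_foldl_union {α : Type} [BEq α] [LawfulBEq α]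
    (ts : List (PySem.Set α)) (t : PySem.Set α) (c : α) :
    c ∈ ts.foldl PySem.Set.union t ↔ c ∈ t ∨ ∃ u ∈ ts, c ∈ u := by
  induction ts generalizing t with
  | nil => simp
  | cons u ts ih =>
    simp only [List.foldl_cons, ih, PySem.Set.mem_union, List.mem_cons]
    constructor
    · rintro (( h | h) | ⟨v, hv, hc⟩)
      · exact Or.inl h
      · exact Or.inr ⟨u, Or.inl rfl, h⟩
      · exact Or.inr ⟨v, Or.inr hv, hc⟩
    · rintro (h | ⟨v, (rfl | hv), hc⟩)
      · exact Or.inl (Or.inl h)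
      · exact Or.inl (Or.inr hc)
      · exact Or.inr ⟨v, hv, hc⟩

theorem pv_foldl_inter {α : Type} [BEq α] [LawfulBEq α]
    (ts : List (PySem.Set α)) (s : PySem.Set α) :
    ts.foldl PySem.Set.inter s = s.filter (fun c => ts.all (fun t => t.contains c)) := by
  induction ts generalizing s with
  | nil => simp
  | cons t ts ih =>
    simp only [List.foldl_cons, ih, PySem.Set.inter, List.filter_filter]
    exact List.filter_congr (fun c _ => by simp [Bool.and_comm])

theorem pv_filter_ofList_append_left {α : Type} [BEq α] [LawfulBEq α]
    (xs ys : List α) (P : α → Bool) (h : ∀ c, P c = true → c ∈ xs) :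
    (PySem.Set.ofList (xs ++ ys)).filter P = (PySem.Set.ofList xs).filter P := by
  rw [PySem.Set.ofList_append, PySem.Set.update_eq_append_filter, List.filter_append]
  have : (List.filter (fun y => !(PySem.Set.ofList xs).contains y) (PySem.Set.ofList ys)).filter P = [] := by
    rw [List.filter_eq_nil_iff]
    intro a ha hP
    have hax := h a hP
    have : a ∈ List.filter (fun y => !(PySem.Set.ofList xs).contains y) (PySem.Set.ofList ys) := ha
    simp [List.mem_filter, PySem.Set.mem_ofList] at this
    exact this.2 hax
  rw [this, List.append_nil]

theorem pv_filter_ofList_append_right {α : Type} [BEq α] [LawfulBEq α]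
    (xs ys : List α) (P : α → Bool) (h : ∀ c, P c = true → c ∉ xs) :
    (PySem.Set.ofList (xs ++ ys)).filter P = (PySem.Set.ofList ys).filter P := by
  rw [PySem.Set.ofList_append, PySem.Set.update_eq_append_filter, List.filter_append]
  have h1 : (PySem.Set.ofList xs).filter P = [] := by
    rw [List.filter_eq_nil_iff]
    intro a ha hP
    exact h a hP (by simpa [PySem.Set.mem_ofList] using ha)
  have h2 : (List.filter (fun y => !(PySem.Set.ofList xs).contains y) (PySem.Set.ofList ys)).filter P
      = (PySem.Set.ofList ys).filter P := by
    rw [List.filter_filter]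
    exact List.filter_congr (fun a _ => by
      by_cases hP : P a = true
      · simp [hP, PySem.Set.contains_iff]
        intro hax; exact h a hP hax
      · simp at hP; simp [hP])
  rw [h1, h2, List.nil_append]

theorem pv_inner_getD (cves : List (String × String)) (ix : PySem.Dict String (PySem.Set String))
    (src c : String) :
    (cves.foldl (fun ix q => ix.modify q.1 [] (fun s => PySem.Set.add s src)) ix).getD c []
      = if (cves.map Prod.fst).contains c then PySem.Set.add (ix.getD c []) src else ix.getD c [] := by
  induction cves generalizing ix with
  | nil => simp
  | cons q cves ih =>
    rw [List.foldl_cons, ih]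
    by_cases hqc : c = q.1
    · subst hqc
      simp only [PySem.Dict.getD_modify, if_pos rfl, List.map_cons, List.contains_cons,
        BEq.rfl, Bool.true_or, if_true]
      split <;> simp [pv_add_idem]
    · have hbc : (q.1 == c) = false := by simpa using fun h => hqc h.symm
      have hcb : (c == q.1) = false := by simpa using hqc
      simp only [PySem.Dict.getD_modify, if_neg hqc, List.map_cons]
      simp only [List.contains_cons, hcb, Bool.false_or]

theorem pv_outer_getD (L : List (String × List (String × String)))
    (ix : PySem.Dict String (PySem.Set String)) (c : String) :
    (L.foldl (fun ix p =>
        p.2.foldl (fun ix q => ix.modify q.1 [] (fun s => PySem.Set.add s p.1)) ix) ix).getD c []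
      = PySem.Set.update (ix.getD c []) (pvSrcs L c) := by
  induction L generalizing ix with
  | nil => simp [pvSrcs]
  | cons p L ih =>
    rw [List.foldl_cons, ih, pv_inner_getD]
    simp only [pvSrcs, List.filter_cons]
    by_cases hc : (p.2.map Prod.fst).contains c = true
    · simp only [if_pos hc, List.map_cons]; rfl
    · simp only [if_neg hc]

theorem pv_outer_keys (L : List (String × List (String × String)))
    (ix : PySem.Dict String (PySem.Set String)) :
    (L.foldl (fun ix p =>
        p.2.foldl (fun ix q => ix.modify q.1 [] (fun s => PySem.Set.add s p.1)) ix) ix).keys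
      = PySem.Set.update ix.keys (pvFlat L) := by
  induction L generalizing ix with
  | nil => simp [pvFlat, PySem.Set.update]
  | cons p L ih =>
    rw [List.foldl_cons, ih, PySem.Dict.keys_foldl_modify_key]
    simp only [pvFlat, List.flatMap_cons, PySem.Set.update_append]

theorem pv_srcs_sublist (L : List (String × List (String × String))) (c : String) :
    (pvSrcs L c).Sublist (L.map Prod.fst) :=
  List.Sublist.map Prod.fst List.filter_sublist

theorem pv_srcs_nodup (L : List (String × List (String × String)))
    (hN : (L.map Prod.fst).Nodup) (c : String) : (pvSrcs L c).Nodup :=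
  hN.sublist (pv_srcs_sublist L c)

theorem pv_index_items (L : List (String × List (String × String)))
    (hN : (L.map Prod.fst).Nodup) :
    (pvIndex L).items = (PySem.Set.ofList (pvFlat L)).map (fun c => (c, pvSrcs L c)) := by
  have hkeys : (pvIndex L).keys = PySem.Set.ofList (pvFlat L) := by
    rw [pvIndex, pv_outer_keys]
    have : (PySem.Dict.empty : PySem.Dict String (PySem.Set String)).keys = [] := rfl
    rw [this, PySem.Set.update_nil_left]
  have hnd : (pvIndex L).keys.Nodup := by rw [hkeys]; exact PySem.Set.nodup_ofList _
  rw [PySem.Dict.items_eq_map_keys _ hnd [], hkeys]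
  apply List.map_congr_left
  intro c hc
  have hgd : (pvIndex L).getD c [] = pvSrcs L c := by
    rw [pvIndex, pv_outer_getD]
    have : (PySem.Dict.empty : PySem.Dict String (PySem.Set String)).getD c [] = [] := rfl
    rw [this, PySem.Set.update_nil_left]
    exact PySem.Set.ofList_eq_self_of_nodup _ (pv_srcs_nodup L hN c)
  rw [hgd]

theorem pv_mem_flat (L : List (String × List (String × String))) (c : String) :
    c ∈ pvFlat L ↔ ∃ p ∈ L, c ∈ p.2.map Prod.fst := by
  simp [pvFlat, List.mem_flatMap]

theorem pv_srcs_len_iff (L : List (String × List (String × String)))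
    (hN : (L.map Prod.fst).Nodup) (c : String) :
    (pvSrcs L c).length = (L.filter (fun p => !p.2.isEmpty)).length
      ↔ ∀ p ∈ L.filter (fun p => !p.2.isEmpty), (p.2.map Prod.fst).contains c = true := by
  have hsub : ∀ p : String × List (String × String),
      ((p.2.map Prod.fst).contains c) = true → (!p.2.isEmpty) = true := by
    intro p hp
    rcases hp2 : p.2 with _ | ⟨a, t⟩
    · rw [hp2] at hp; simp at hp
    · simp [hp2]
  have h1 : L.filter (fun p => (p.2.map Prod.fst).contains c) =
      (L.filter (fun p => !p.2.isEmpty)).filter (fun p => (p.2.map Prod.fst).contains c) := by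
    rw [List.filter_filter]
    refine (List.filter_congr (fun p _ => ?_)).symm
    by_cases h : ((p.2.map Prod.fst).contains c) = true
    · simp [h, hsub p h]
    · simp only [Bool.not_eq_true] at h; rw [h]; simp
  unfold pvSrcs
  rw [List.length_map, h1]
  exact List.length_filter_eq_length_iff

theorem pv_srcs_singleton (L : List (String × List (String × String)))
    (hN : (L.map Prod.fst).Nodup) (p : String × List (String × String)) (hp : p ∈ L)
    (hc : (p.2.map Prod.fst).contains c = true) :
    pvSrcs L c = [p.1] ↔ ∀ r ∈ L, (r.2.map Prod.fst).contains c = true → r = p := by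
  have hLnd : L.Nodup := hN.of_map
  have hinj := List.inj_on_of_nodup_map hN
  constructor
  · intro h r hr hrc
    have hm : r.1 ∈ (L.filter (fun p => (p.2.map Prod.fst).contains c)).map Prod.fst :=
      List.mem_map_of_mem (List.mem_filter.mpr ⟨hr, hrc⟩)
    rw [show (L.filter (fun p => (p.2.map Prod.fst).contains c)).map Prod.fst = pvSrcs L c from rfl, h] at hm
    simp at hm
    exact hinj hr hp hm
  · intro h
    have hfil : L.filter (fun p => (p.2.map Prod.fst).contains c) = [p] := by
      have hpmem : p ∈ L.filter (fun p => (p.2.map Prod.fst).contains c) :=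
        List.mem_filter.mpr ⟨hp, hc⟩
      have hall : ∀ r ∈ L.filter (fun p => (p.2.map Prod.fst).contains c), r = p :=
        fun r hr => h r (List.mem_filter.mp hr).1 (List.mem_filter.mp hr).2
      have hnd : (L.filter (fun p => (p.2.map Prod.fst).contains c)).Nodup := hLnd.filter _
      revert hpmem hall hnd
      cases hf : L.filter (fun p => (p.2.map Prod.fst).contains c) with
      | nil => intro hpmem _ _; simp at hpmem
      | cons x xs =>
        intro hpmem hall hnd
        have hx : x = p := hall x (List.mem_cons_self ..)
        cases xs with
        | nil => rw [hx]
        | cons y ys =>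
          exfalso
          have hy : y = p := hall y (by simp)
          rw [hx, hy] at hnd
          simp at hnd
    unfold pvSrcs
    rw [hfil]
    rfl

theorem pv_uq_getD (items : List (String × PySem.Set String))
    (u : PySem.Dict String (PySem.Set String)) (s : String) :
    (items.foldl pvUqStep u).getD s []
      = PySem.Set.update (u.getD s []) ((items.filter (fun q => decide (q.2 = [s]))).map Prod.fst) := by
  induction items generalizing u with
  | nil => simp [PySem.Set.update]
  | cons q items ih =>
    rw [List.foldl_cons, ih]
    simp only [List.filter_cons]
    rcases hq : q.2 with _ | ⟨a, t⟩
    · simp [pvUqStep, hq]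
    · rcases t with _ | ⟨b, t'⟩
      · by_cases hsa : s = a
        · subst hsa
          simp only [hq, decide_eq_true_eq, if_pos rfl, List.map_cons]
          have : (pvUqStep u q).getD s [] = PySem.Set.add (u.getD s []) q.1 := by
            simp [pvUqStep, hq, PySem.Dict.getD_modify]
          rw [this]; rfl
        · have : (pvUqStep u q).getD s [] = u.getD s [] := by
            simp [pvUqStep, hq, PySem.Dict.getD_modify, hsa]
          rw [this]
          have hcond : (decide ([a] = [s])) = false := by
            simp; exact fun h => hsa h.symm
          simp only [hcond, Bool.false_eq_true, if_false]
      · have : pvUqStep u q = u := by simp [pvUqStep, hq]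
        rw [this]
        simp [hq]

theorem pv_uq_keys (items : List (String × PySem.Set String))
    (u : PySem.Dict String (PySem.Set String))
    (h : ∀ q ∈ items, ∀ s', q.2 = [s'] → s' ∈ u.keys) :
    (items.foldl pvUqStep u).keys = u.keys := by
  induction items generalizing u with
  | nil => rfl
  | cons q items ih =>
    have hstep : (pvUqStep u q).keys = u.keys := by
      rcases hq : q.2 with _ | ⟨a, t⟩
      · simp [pvUqStep, hq]
      · rcases t with _ | ⟨b, t'⟩
        · have ha : a ∈ u.keys := h q (List.mem_cons_self ..) a hq
          have hcon : u.contains a = true := (PySem.Dict.contains_iff_mem_keys u a).mpr ha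
          rw [pvUqStep, hq]
          rw [PySem.Dict.keys_modify, PySem.Dict.keys_insert_of_contains _ _ hcon]
        · simp [pvUqStep, hq]
    rw [List.foldl_cons, ih, hstep]
    intro q' hq' s' hs'
    rw [hstep]
    exact h q' (List.mem_cons_of_mem _ hq') s' hs'

theorem pv_ofList_isEmpty {α : Type} [BEq α] [LawfulBEq α] (xs : List α) :
    (PySem.Set.ofList xs).isEmpty = xs.isEmpty := by
  cases xs with
  | nil => rfl
  | cons a t => rw [PySem.Set.ofList_cons]; rfl

-- P-elements occur only in r's segment: every other source's cve list misses them
theorem pv_srcs_eq_singleton_mem (M : List (String × List (String × String)))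
    (hN : (M.map Prod.fst).Nodup) (r : String × List (String × String)) (hr : r ∈ M)
    (c : String) (h : pvSrcs M c = [r.1]) :
    (r.2.map Prod.fst).contains c = true ∧
      ∀ x ∈ M, x ≠ r → (x.2.map Prod.fst).contains c = false := by
  have hinj := List.inj_on_of_nodup_map hN
  have hfil : M.filter (fun p => (p.2.map Prod.fst).contains c) = [r] := by
    unfold pvSrcs at h
    rcases hf : M.filter (fun p => (p.2.map Prod.fst).contains c) with _ | ⟨x, xs⟩
    · rw [hf] at h; simp at h
    · rw [hf] at h
      rcases xs with _ | ⟨y, ys⟩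
      · simp only [List.map_cons, List.map_nil] at h
        have hx1 : x.1 = r.1 := (List.cons_eq_cons.mp h).1
        have hxM : x ∈ M := (List.mem_filter.mp (hf ▸ List.mem_cons_self ..)).1
        rw [hf, hinj hxM hr hx1]
      · rw [List.map_cons, List.map_cons] at h; simp at h
  have hrc : (r.2.map Prod.fst).contains c = true := by
    have : r ∈ M.filter (fun p => (p.2.map Prod.fst).contains c) := by
      rw [hfil]; exact List.mem_cons_self ..
    exact (List.mem_filter.mp this).2
  refine ⟨hrc, fun x hx hxr => ?_⟩
  by_contra hxc
  simp only [Bool.not_eq_false] at hxc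
  have : x ∈ M.filter (fun p => (p.2.map Prod.fst).contains c) := List.mem_filter.mpr ⟨hx, hxc⟩
  rw [hfil] at this
  exact hxr (by simpa using this)

theorem pv_core (L : List (String × List (String × String)))
    (hN : (L.map Prod.fst).Nodup) (hlen : L.length ≠ 1) :
    pvAbody L = pvBbody L := by
  have key : ∀ (M : List (String × List (String × String))), M ≠ [] →
      (M.map Prod.fst).Nodup → M.length ≠ 1 → pvAbody M = pvBbody M := by
    intro M hne hN hlen
    rw [pvAbody, pvBbody]
    have hifE : ((M.map (fun p => (p.1, PySem.Set.ofList (p.2.map Prod.fst)))).isEmpty) = false := by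
      rcases M with _ | ⟨a, t⟩
      · exact absurd rfl hne
      · rfl
    rw [hifE]
    simp only [Bool.false_eq_true, if_false, Prod.mk.injEq]
    constructor
    · -- common part
      have hmm : (M.map (fun p => (p.1, PySem.Set.ofList (p.2.map Prod.fst)))).map Prod.snd
          = M.map (fun p => PySem.Set.ofList (p.2.map Prod.fst)) := by
        rw [List.map_map]; rfl
      rw [hmm, List.filter_map]
      have hcomp : ((fun s => !List.isEmpty s) ∘ fun p : String × List (String × String) =>
          PySem.Set.ofList (p.2.map Prod.fst)) = fun p => !p.2.isEmpty := by
        funext p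
        simp [Function.comp, pv_ofList_isEmpty, List.isEmpty_map]
      rw [hcomp]
      rw [pv_index_items M hN, List.filter_map, List.map_map]
      have hfstid : (Prod.fst ∘ fun c => (c, pvSrcs M c)) = id := rfl
      rw [hfstid, List.map_id]
      have hsum : ((M.filter (fun p => !p.2.isEmpty)).map (fun _ => (1 : Int))).sum
          = ((M.filter (fun p => !p.2.isEmpty)).length : Int) := by
        rw [PySem.List.sum_map_const_int]; ring
      have hpred : ∀ c ∈ PySem.Set.ofList (pvFlat M),
          ((fun q : String × PySem.Set String =>
              ((q.2.length : Int) == ((M.filter (fun p => !p.2.isEmpty)).map (fun _ => (1 : Int))).sum)) ∘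
            (fun c => (c, pvSrcs M c))) c
          = decide ((pvSrcs M c).length = (M.filter (fun p => !p.2.isEmpty)).length) := by
        intro c _
        show ((((pvSrcs M c).length : Int)) == _) = _
        rw [hsum]
        by_cases h : (pvSrcs M c).length = (M.filter (fun p => !p.2.isEmpty)).length
        · rw [h]; simp
        · simp [h]
      rw [List.filter_congr hpred]
      rw [PySem.Set.ofList_eq_self_of_nodup _ ((PySem.Set.nodup_ofList _).filter _)]
      rcases hNE : M.filter (fun p => !p.2.isEmpty) with _ | ⟨p₁, NE'⟩
      · rw [hNE, List.map_nil]
        have hflat : pvFlat M = [] := by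
          rw [pvFlat, List.flatMap_eq_nil_iff]
          intro p hp
          have h0 := List.filter_eq_nil_iff.mp hNE p hp
          have h2 : p.2 = [] := by simpa using h0
          simp [h2]
        rw [hflat]
        rfl
      · rw [hNE, List.map_cons]
        show List.foldl PySem.Set.inter (PySem.Set.ofList (p₁.2.map Prod.fst))
            (NE'.map fun p => PySem.Set.ofList (p.2.map Prod.fst)) = _
        rw [pv_foldl_inter]
        obtain ⟨M₁, M₂, hM, hM₁, hp₁ne, hM₂⟩ := List.filter_eq_cons_iff.mp hNE
        have hPmem : ∀ c, (decide ((pvSrcs M c).length = (p₁ :: NE').length)) = true →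
            c ∈ p₁.2.map Prod.fst := by
          intro c hc
          rw [decide_eq_true_eq] at hc
          have hall := (pv_srcs_len_iff M hN c).mp (by rw [hNE]; exact hc)
          have hp₁NE : p₁ ∈ M.filter (fun p => !p.2.isEmpty) := by
            rw [hNE]; exact List.mem_cons_self ..
          exact List.contains_iff_mem.mp (hall p₁ hp₁NE)
        have hflatM : pvFlat M = p₁.2.map Prod.fst ++ pvFlat M₂ := by
          rw [hM, pvFlat, List.flatMap_append, List.flatMap_cons]
          have : M₁.flatMap (fun p => p.2.map Prod.fst) = [] := by
            rw [List.flatMap_eq_nil_iff]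
            intro p hp
            have h0 := hM₁ p hp
            have h2 : p.2 = [] := by simpa using h0
            simp [h2]
          rw [this, List.nil_append]
          rfl
        rw [hflatM, pv_filter_ofList_append_left _ _ _ hPmem]
        apply List.filter_congr
        intro c hcm
        have hc₁ : c ∈ p₁.2.map Prod.fst := (PySem.Set.mem_ofList _ _).mp hcm
        have hlen_iff := pv_srcs_len_iff M hN c
        rw [hNE] at hlen_iff
        apply Bool.coe_iff_coe.mp
        rw [List.all_eq_true, decide_eq_true_eq]
        constructor
        · intro hall
          refine hlen_iff.mpr ?_
          intro p hp
          rcases List.mem_cons.mp hp with h1 | h2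
          · subst h1; exact List.contains_iff_mem.mpr hc₁
          · have hct := hall _ (List.mem_map_of_mem h2)
            have hmem := (PySem.Set.mem_ofList _ _).mp (List.contains_iff_mem.mp hct)
            exact List.contains_iff_mem.mpr hmem
        · intro hlenEq t ht
          obtain ⟨p, hpNE', rfl⟩ := List.mem_map.mp ht
          have hcp := hlen_iff.mp hlenEq p (List.mem_cons_of_mem _ hpNE')
          exact List.contains_iff_mem.mpr ((PySem.Set.mem_ofList _ _).mpr (List.contains_iff_mem.mp hcp))
    · -- unique part
      have hinj := List.inj_on_of_nodup_map hN
      have huq0items : (M.foldl (fun u p => u.insert p.1 ([] : PySem.Set String)) PySem.Dict.empty).items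
          = M.map (fun p => (p.1, ([] : PySem.Set String))) := by
        have h := PySem.Dict.items_foldl_insert_fresh M (fun p => p.1)
          (fun _ => ([] : PySem.Set String)) PySem.Dict.empty (fun a _ => rfl) (by simpa using hN)
        simpa using h
      have huq0keys : (M.foldl (fun u p => u.insert p.1 ([] : PySem.Set String)) PySem.Dict.empty).keys
          = M.map Prod.fst := by
        rw [PySem.Dict.keys, huq0items, List.map_map]; rfl
      have hKitems := pv_index_items M hN
      have hhyp : ∀ q ∈ (pvIndex M).items, ∀ s', q.2 = [s'] →
          s' ∈ (M.foldl (fun u p => u.insert p.1 ([] : PySem.Set String)) PySem.Dict.empty).keys := by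
        intro q hq s' hs'
        rw [huq0keys]
        rw [hKitems] at hq
        obtain ⟨c, hcK, rfl⟩ := List.mem_map.mp hq
        have hmem : s' ∈ pvSrcs M c := by
          simp only at hs'
          rw [hs']; exact List.mem_cons_self ..
        exact (pv_srcs_sublist M c).mem hmem
      have hkeysfold := pv_uq_keys (pvIndex M).items _ hhyp
      rw [huq0keys] at hkeysfold
      have hfinal_items : (List.foldl pvUqStep
            (M.foldl (fun u p => u.insert p.1 ([] : PySem.Set String)) PySem.Dict.empty)
            (pvIndex M).items).items
          = (M.map Prod.fst).map (fun t =>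
              (t, (List.foldl pvUqStep
                (M.foldl (fun u p => u.insert p.1 ([] : PySem.Set String)) PySem.Dict.empty)
                (pvIndex M).items).getD t [])) := by
        have hnd2 : (List.foldl pvUqStep
            (M.foldl (fun u p => u.insert p.1 ([] : PySem.Set String)) PySem.Dict.empty)
            (pvIndex M).items).keys.Nodup := by rw [hkeysfold]; exact hN
        have h := PySem.Dict.items_eq_map_keys _ hnd2 ([] : PySem.Set String)
        rw [h, hkeysfold]
      have hgetD : ∀ r ∈ M, (List.foldl pvUqStep
            (M.foldl (fun u p => u.insert p.1 ([] : PySem.Set String)) PySem.Dict.empty)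
            (pvIndex M).items).getD r.1 []
          = (PySem.Set.ofList (pvFlat M)).filter (fun c => decide (pvSrcs M c = [r.1])) := by
        intro r hr
        rw [pv_uq_getD]
        have huq0g : (M.foldl (fun u p => u.insert p.1 ([] : PySem.Set String)) PySem.Dict.empty).getD r.1 [] = [] := by
          apply PySem.Dict.getD_of_mem_items
          · rw [huq0items]
            exact List.mem_map_of_mem hr
          · rw [huq0keys]; exact hN
        rw [huq0g, PySem.Set.update_nil_left]
        rw [hKitems, List.filter_map, List.map_map]
        have hfst : (Prod.fst ∘ fun c => (c, pvSrcs M c)) = id := rfl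
        rw [hfst, List.map_id]
        have hpred2 : ∀ c ∈ PySem.Set.ofList (pvFlat M),
            ((fun q : String × PySem.Set String => decide (q.2 = [r.1])) ∘ (fun c => (c, pvSrcs M c))) c
            = decide (pvSrcs M c = [r.1]) := fun c _ => rfl
        rw [List.filter_congr hpred2]
        exact PySem.Set.ofList_eq_self_of_nodup _ ((PySem.Set.nodup_ofList _).filter _)
      rw [hfinal_items, List.map_map, List.map_map]
      apply List.map_congr_left
      intro r hr
      simp only [Function.comp_apply]
      rw [hgetD r hr]
      congr 1
      have hOeq : ((M.map (fun p => (p.1, PySem.Set.ofList (p.2.map Prod.fst)))).filter (fun q => q.1 != r.1)).map Prod.snd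
          = (M.filter (fun q => q.1 != r.1)).map (fun p => PySem.Set.ofList (p.2.map Prod.fst)) := by
        rw [List.filter_map, List.map_map]
        rfl
      rw [hOeq]
      have hObne : ∃ x ∈ M, (x.1 != r.1) = true := by
        rcases M with _ | ⟨a, _ | ⟨b, t⟩⟩
        · exact absurd rfl hne
        · exact absurd rfl hlen
        · have hab : a.1 ≠ b.1 := by
            simp only [List.map_cons, List.nodup_cons, List.mem_cons] at hN
            exact fun h => hN.1 (Or.inl h)
          by_cases hra : a.1 = r.1
          · refine ⟨b, by simp, ?_⟩
            rw [bne_iff_ne]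
            intro hb
            exact hab (by rw [hra, hb])
          · exact ⟨a, by simp, by rw [bne_iff_ne]; exact hra⟩
      obtain ⟨x₀, hx₀M, hx₀ne⟩ := hObne
      have hOne : M.filter (fun q => q.1 != r.1) ≠ [] :=
        List.ne_nil_of_mem (List.mem_filter.mpr ⟨hx₀M, hx₀ne⟩)
      rcases hOc : M.filter (fun q => q.1 != r.1) with _ | ⟨o₁, Orest⟩
      · exact absurd hOc hOne
      · rw [hOc, List.map_cons]
        show PySem.Set.diff (PySem.Set.ofList (r.2.map Prod.fst))
            (List.foldl PySem.Set.union (PySem.Set.ofList (o₁.2.map Prod.fst))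
              (Orest.map (fun p => PySem.Set.ofList (p.2.map Prod.fst)))) = _
        -- decompose M around r
        obtain ⟨M₁, M₂, hM⟩ := List.append_of_mem hr
        have hrkeys : r.1 ∉ M₁.map Prod.fst ∧ r.1 ∉ M₂.map Prod.fst := by
          have hN' := hN
          rw [hM, List.map_append, List.map_cons] at hN'
          rw [List.nodup_append] at hN'
          obtain ⟨h1, h2, h3⟩ := hN'
          refine ⟨fun hmem => h3 r.1 hmem r.1 (by simp) rfl, ?_⟩
          rw [List.nodup_cons] at h2
          exact h2.1
        have hPr : ∀ c, (decide (pvSrcs M c = [r.1])) = true →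
            c ∈ r.2.map Prod.fst ∧ c ∉ pvFlat M₁ ∧ c ∉ pvFlat M₂ := by
          intro c hc
          rw [decide_eq_true_eq] at hc
          obtain ⟨hcr, hother⟩ := pv_srcs_eq_singleton_mem M hN r hr c hc
          refine ⟨List.contains_iff_mem.mp hcr, ?_, ?_⟩
          · intro hcf
            obtain ⟨x, hx₁, hx₂⟩ := (pv_mem_flat M₁ c).mp hcf
            have hxM : x ∈ M := by rw [hM]; exact List.mem_append_left _ hx₁
            have hxr : x ≠ r := by
              intro h; rw [h] at hx₁
              exact hrkeys.1 (List.mem_map_of_mem hx₁)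
            have hct : (x.2.map Prod.fst).contains c = true := List.contains_iff_mem.mpr hx₂
            rw [hother x hxM hxr] at hct
            exact Bool.false_ne_true hct
          · intro hcf
            obtain ⟨x, hx₁, hx₂⟩ := (pv_mem_flat M₂ c).mp hcf
            have hxM : x ∈ M := by rw [hM]; exact List.mem_append_right _ (List.mem_cons_of_mem _ hx₁)
            have hxr : x ≠ r := by
              intro h; rw [h] at hx₁
              exact hrkeys.2 (List.mem_map_of_mem hx₁)
            have hct : (x.2.map Prod.fst).contains c = true := List.contains_iff_mem.mpr hx₂
            rw [hother x hxM hxr] at hct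
            exact Bool.false_ne_true hct
        have hflatM' : pvFlat M = pvFlat M₁ ++ (r.2.map Prod.fst ++ pvFlat M₂) := by
          rw [hM, pvFlat, List.flatMap_append, List.flatMap_cons]
          rfl
        rw [hflatM']
        rw [pv_filter_ofList_append_right _ _ _ (fun c hc => (hPr c hc).2.1)]
        rw [pv_filter_ofList_append_left _ _ _ (fun c hc => (hPr c hc).1)]
        unfold PySem.Set.diff
        apply List.filter_congr
        intro c hcm
        have hc_r : c ∈ r.2.map Prod.fst := (PySem.Set.mem_ofList _ _).mp hcm
        have hcontr : (r.2.map Prod.fst).contains c = true := List.contains_iff_mem.mpr hc_r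
        apply Bool.coe_iff_coe.mp
        rw [Bool.not_eq_eq_eq_not, Bool.not_true, decide_eq_true_eq]
        set U := List.foldl PySem.Set.union (PySem.Set.ofList (o₁.2.map Prod.fst))
            (Orest.map (fun p => PySem.Set.ofList (p.2.map Prod.fst))) with hUdef
        have hUiff : U.contains c = true ↔ ∃ x ∈ M, x ≠ r ∧ c ∈ x.2.map Prod.fst := by
          rw [hUdef, PySem.Set.contains_iff, pv_mem_foldl_union]
          have ho₁ : o₁ ∈ M.filter (fun q => q.1 != r.1) := by
            rw [hOc]; exact List.mem_cons_self ..
          constructor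
          · rintro (h | ⟨u, hu, hcu⟩)
            · refine ⟨o₁, (List.mem_filter.mp ho₁).1, ?_, (PySem.Set.mem_ofList _ _).mp h⟩
              have hbne := (List.mem_filter.mp ho₁).2
              rw [bne_iff_ne] at hbne
              exact fun h' => hbne (by rw [h'])
            · obtain ⟨x, hxO, rfl⟩ := List.mem_map.mp hu
              have hxF : x ∈ M.filter (fun q => q.1 != r.1) := by
                rw [hOc]; exact List.mem_cons_of_mem _ hxO
              have hbne := (List.mem_filter.mp hxF).2
              rw [bne_iff_ne] at hbne
              exact ⟨x, (List.mem_filter.mp hxF).1, fun h' => hbne (by rw [h']),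
                (PySem.Set.mem_ofList _ _).mp hcu⟩
          · rintro ⟨x, hxM, hxr, hcx⟩
            have hxbne : (x.1 != r.1) = true := by
              rw [bne_iff_ne]; exact fun h1 => hxr (hinj hxM hr h1)
            have hxO : x ∈ M.filter (fun q => q.1 != r.1) := List.mem_filter.mpr ⟨hxM, hxbne⟩
            rw [hOc] at hxO
            rcases List.mem_cons.mp hxO with h | h
            · exact Or.inl (by rw [← h]; exact (PySem.Set.mem_ofList _ _).mpr hcx)
            · exact Or.inr ⟨_, List.mem_map_of_mem h, (PySem.Set.mem_ofList _ _).mpr hcx⟩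
        constructor
        · intro hUf
          refine (pv_srcs_singleton M hN r hr hcontr).mpr ?_
          intro x hx hxc
          by_contra hxr
          have hUt : U.contains c = true :=
            hUiff.mpr ⟨x, hx, hxr, List.contains_iff_mem.mp hxc⟩
          rw [hUf] at hUt
          exact Bool.false_ne_true hUt
        · intro hsing
          obtain ⟨_, hother⟩ := pv_srcs_eq_singleton_mem M hN r hr c hsing
          cases hU : U.contains c with
          | false => rfl
          | true =>
            obtain ⟨x, hxM, hxr, hcx⟩ := hUiff.mp hU
            have hct := List.contains_iff_mem.mpr hcx
            rw [hother x hxM hxr] at hct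
            exact absurd hct (by simp)
  cases L with
  | nil => rfl
  | cons p₀ L₀ => exact key _ (by simp) hN hlen

theorem pv_keys_ofList (cve_dict : List (String × List (String × String))) :
    ((PySem.Dict.ofList cve_dict).items.map Prod.fst).Nodup := by
  have h := PySem.Dict.nodup_keys_ofList (ν := List (String × String)) cve_dict
  simpa [PySem.Dict.keys] using h

-- ===== VERDICT (by name: the statement is the Claim_ definition above) =====
theorem compare_cve_sets_spec : Claim_equal_compare_cve_sets := by
  intro cve_dict _ hpre
  unfold Spec_compare_cve_sets compare_cve_sets compare_cve_sets_alt
  exact pv_core _ (pv_keys_ofList cve_dict) hpre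

def compare_cve_sets_raises : Claim_raises_compare_cve_sets := by
  unfold Claim_raises_compare_cve_sets
  exact ⟨fun cve_dict _ h hp => hp h, by decide⟩
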